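-- pv_equiv track=rewrite | github.com/positiveway/TypedPython | main.py | gen_lines_with_ident
-- ===== SOURCE A (Python) =====
-- def get_ident(line):
--     ident_len = len(line) - len(line.lstrip())
--     return line[:ident_len]
--
-- def increase_ident(ident):
--     return ident + SINGLE_IDENT
--
-- def get_increased_ident(line):
--     return increase_ident(get_ident(line))
--
-- def gen_lines_with_ident(base_ident_line, lines):
--     base_ident = get_increased_ident(base_ident_line)
--     res = []
--     for line in lines:
--         res.append(f'{base_ident}{line}')
--         if match_signature('if ', line):
--             base_ident = get_increased_ident(base_ident)
--
--     return res
--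
-- def match_signature(signature: str, line: str):
--     return line.lstrip().startswith(signature)
--
-- SINGLE_IDENT = ' ' * 4
-- ===== SOURCE B (Python) =====
-- SINGLE_IDENT = ' ' * 4
--
-- def gen_lines_with_ident(base_ident_line, lines):
--     stripped = base_ident_line.lstrip()
--     base = base_ident_line[:len(base_ident_line) - len(stripped)] + SINGLE_IDENT
--     # a line's indent level = total 'if '-lines minus those at or after it,
--     # so walk the lines BACK-TO-FRONT with a decrementing counter and reverse at the end
--     remaining = sum(1 for line in lines if line.lstrip().startswith('if '))
--     out = []
--     for line in reversed(lines):
--         if line.lstrip().startswith('if '):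
--             remaining -= 1
--         out.append(base + SINGLE_IDENT * remaining + line)
--     out.reverse()
--     return out
-- ===== Notes on version B (the rewrite author's own statement) =====
-- stated objective: alternative
-- what changed: Instead of A's forward loop mutating a growing indentation string, B counts the 'if '-lines once, then traverses the lines back-to-front with a decrementing counter (level = total minus if-lines at or after the line), building the output in reverse and reversing at the end.
import Mathlib
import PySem

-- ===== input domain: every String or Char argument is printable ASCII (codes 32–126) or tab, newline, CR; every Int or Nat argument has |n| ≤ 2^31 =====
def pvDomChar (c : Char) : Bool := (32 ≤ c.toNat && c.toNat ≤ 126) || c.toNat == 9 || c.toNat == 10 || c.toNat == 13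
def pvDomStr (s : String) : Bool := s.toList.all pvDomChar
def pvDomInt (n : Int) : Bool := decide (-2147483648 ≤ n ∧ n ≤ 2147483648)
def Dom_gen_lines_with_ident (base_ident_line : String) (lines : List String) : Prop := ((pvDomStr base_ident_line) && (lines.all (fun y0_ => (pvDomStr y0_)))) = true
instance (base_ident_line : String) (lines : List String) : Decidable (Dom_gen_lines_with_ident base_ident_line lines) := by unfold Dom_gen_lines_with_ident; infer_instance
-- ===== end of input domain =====

-- B replaces A's forward loop with a growing indentation string by: count the 'if '-lines once,
-- then a backward pass with a decrementing counter building the output in reverse (objective: alternative).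

-- ===== PORT A =====
def pvSINGLE_IDENT : List Char := [' ', ' ', ' ', ' ']

-- get_ident(line) = line[:len(line) - len(line.lstrip())]
def pvGetIdent (line : List Char) : List Char :=
  PySem.Chars.slice line none (some ((PySem.Chars.len line : Int) - (PySem.Chars.len (PySem.Chars.lstrip line) : Int)))

def pvIncreaseIdent (ident : List Char) : List Char := ident ++ pvSINGLE_IDENT

def pvGetIncreasedIdent (line : List Char) : List Char := pvIncreaseIdent (pvGetIdent line)

def pvMatchSignature (signature : List Char) (line : List Char) : Bool :=
  PySem.Chars.startswith (PySem.Chars.lstrip line) signature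

-- the body of A's for-loop, one iteration
def pvStep (st : List Char × List String) (line : String) : List Char × List String :=
  let res := st.2 ++ [String.ofList (st.1 ++ line.toList)]
  if pvMatchSignature ['i', 'f', ' '] line.toList then
    (pvGetIncreasedIdent st.1, res)
  else (st.1, res)

def gen_lines_with_ident (base_ident_line : String) (lines : List String) : List String :=
  (lines.foldl pvStep (pvGetIncreasedIdent base_ident_line.toList, [])).2

-- ===== PORT B =====
-- one iteration of Source B's backward loop: maybe decrement, then append the built line
def pvAltStep (base : List Char) (st : Nat × List String) (line : String) : Nat × List String :=
  let r := if PySem.Chars.startswith (PySem.Chars.lstrip line.toList) ['i', 'f', ' '] then st.1 - 1 else st.1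
  (r, st.2 ++ [String.ofList (base ++ PySem.List.pyRepeat pvSINGLE_IDENT (r : Int) ++ line.toList)])

def gen_lines_with_ident_alt (base_ident_line : String) (lines : List String) : List String :=
  let stripped := PySem.Chars.lstrip base_ident_line.toList
  let base := PySem.Chars.slice base_ident_line.toList none
      (some ((PySem.Chars.len base_ident_line.toList : Int) - (PySem.Chars.len stripped : Int))) ++ pvSINGLE_IDENT
  let remaining := lines.countP (fun line => PySem.Chars.startswith (PySem.Chars.lstrip line.toList) ['i', 'f', ' '])
  ((lines.reverse.foldl (pvAltStep base) (remaining, [])).2).reverse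

-- ===== PRECONDITION & SPEC =====
def Spec_gen_lines_with_ident (base_ident_line : String) (lines : List String) (out : List String) : Prop := out = gen_lines_with_ident_alt base_ident_line lines
instance (base_ident_line : String) (lines : List String) (out : List String) : Decidable (Spec_gen_lines_with_ident base_ident_line lines out) := by unfold Spec_gen_lines_with_ident; infer_instance

-- ===== CLAIM =====
def Claim_equal_gen_lines_with_ident : Prop := ∀ (base_ident_line : String) (lines : List String), Dom_gen_lines_with_ident base_ident_line lines → Spec_gen_lines_with_ident base_ident_line lines (gen_lines_with_ident base_ident_line lines)

-- ===== LEMMAS AND PROOFS =====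

-- level of each line = number of prior 'if '-lines; both ports are shown equal to the map over these levels
def pvLevels (lines : List String) (lvl : Nat) : List Nat :=
  match lines with
  | [] => []
  | line :: rest =>
      lvl :: pvLevels rest (if PySem.Chars.startswith (PySem.Chars.lstrip line.toList) ['i', 'f', ' '] then lvl + 1 else lvl)

def pvBuild (base : List Char) (lines : List String) (lvl : Nat) : List String :=
  (lines.zip (pvLevels lines lvl)).map
    (fun p => String.ofList (base ++ PySem.List.pyRepeat pvSINGLE_IDENT ((p.2 : Nat) : Int) ++ p.1.toList))

def pvCountIf (lines : List String) : Nat :=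
  lines.countP (fun line => PySem.Chars.startswith (PySem.Chars.lstrip line.toList) ['i', 'f', ' '])

theorem pvRep_zero (xs : List Char) : PySem.List.pyRepeat xs 0 = [] := by
  simp [PySem.List.pyRepeat]

theorem pvRep_succ (xs : List Char) (n : Nat) :
    PySem.List.pyRepeat xs ((n + 1 : Nat) : Int) = PySem.List.pyRepeat xs (n : Int) ++ xs := by
  simp [PySem.List.pyRepeat, List.replicate_succ']

theorem pvRep_isspace (n : Nat) :
    (PySem.List.pyRepeat pvSINGLE_IDENT (n : Int)).all PySem.Chars.isspace = true := by
  induction n with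
  | zero => simp [pvRep_zero]
  | succ k ih => rw [pvRep_succ]; simp_all [pvSINGLE_IDENT]; decide

theorem pvGetIdent_eq_takeWhile (cs : List Char) :
    pvGetIdent cs = cs.takeWhile PySem.Chars.isspace := by
  unfold pvGetIdent
  have hlen : (cs.takeWhile PySem.Chars.isspace).length + (cs.dropWhile PySem.Chars.isspace).length = cs.length := by
    rw [← List.length_append, List.takeWhile_append_dropWhile]
  have hc : ((PySem.Chars.len cs : Int) - (PySem.Chars.len (PySem.Chars.lstrip cs) : Int))
      = ((cs.takeWhile PySem.Chars.isspace).length : Int) := by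
    simp only [PySem.Chars.len, PySem.Chars.lstrip]
    omega
  rw [hc]
  rw [PySem.Chars.slice_eq_listSlice, PySem.List.slice_to_natCast]
  have hp := List.takeWhile_prefix (l := cs) (p := PySem.Chars.isspace)
  rw [List.prefix_iff_eq_take] at hp
  exact hp.symm

theorem pvGetIdent_isspace (cs : List Char) :
    (pvGetIdent cs).all PySem.Chars.isspace = true := by
  rw [pvGetIdent_eq_takeWhile]
  simp only [List.all_eq_true]
  intro c hc
  exact List.mem_takeWhile_imp hc

theorem pvGetIdent_of_isspace (cs : List Char) (h : cs.all PySem.Chars.isspace = true) :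
    pvGetIdent cs = cs := by
  rw [pvGetIdent_eq_takeWhile]
  rw [List.takeWhile_eq_self_iff.mpr]
  simpa [List.all_eq_true] using h

-- A's fold equals the level map
theorem pvFoldA (b : List Char) (hb : b.all PySem.Chars.isspace = true) :
    ∀ (lines : List String) (lvl : Nat) (res : List String),
    (lines.foldl pvStep (b ++ PySem.List.pyRepeat pvSINGLE_IDENT (lvl : Int), res)).2
    = res ++ pvBuild b lines lvl := by
  intro lines
  induction lines with
  | nil => intro lvl res; simp [pvBuild, pvLevels]
  | cons line rest ih =>
    intro lvl res
    rw [List.foldl_cons]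
    cases hm : pvMatchSignature ['i', 'f', ' '] line.toList with
    | true =>
      have hstep : pvStep (b ++ PySem.List.pyRepeat pvSINGLE_IDENT (lvl : Int), res) line
          = (b ++ PySem.List.pyRepeat pvSINGLE_IDENT ((lvl + 1 : Nat) : Int),
             res ++ [String.ofList (b ++ PySem.List.pyRepeat pvSINGLE_IDENT (lvl : Int) ++ line.toList)]) := by
        unfold pvStep pvGetIncreasedIdent pvIncreaseIdent
        rw [if_pos hm, pvGetIdent_of_isspace, pvRep_succ, List.append_assoc]
        simp [List.all_append, hb, pvRep_isspace]
      rw [hstep, ih]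
      have hm' : PySem.Chars.startswith (PySem.Chars.lstrip line.toList) ['i', 'f', ' '] = true := hm
      simp [pvBuild, pvLevels, hm']
    | false =>
      have hstep : pvStep (b ++ PySem.List.pyRepeat pvSINGLE_IDENT (lvl : Int), res) line
          = (b ++ PySem.List.pyRepeat pvSINGLE_IDENT (lvl : Int),
             res ++ [String.ofList (b ++ PySem.List.pyRepeat pvSINGLE_IDENT (lvl : Int) ++ line.toList)]) := by
        unfold pvStep
        rw [if_neg (by simp [hm])]
      rw [hstep, ih]
      have hm' : PySem.Chars.startswith (PySem.Chars.lstrip line.toList) ['i', 'f', ' '] = false := hm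
      simp [pvBuild, pvLevels, hm']

-- B's backward fold equals the reversed level map
theorem pvFoldB (b : List Char) :
    ∀ (lines : List String) (m : Nat) (acc : List String),
    lines.reverse.foldl (pvAltStep b) (pvCountIf lines + m, acc)
    = (m, acc ++ (pvBuild b lines m).reverse) := by
  intro lines
  induction lines with
  | nil => intro m acc; simp [pvCountIf, pvBuild, pvLevels]
  | cons line rest ih =>
    intro m acc
    rw [List.reverse_cons, List.foldl_append]
    cases hm : PySem.Chars.startswith (PySem.Chars.lstrip line.toList) ['i', 'f', ' '] with
    | true =>
      have hc : pvCountIf (line :: rest) + m = pvCountIf rest + (m + 1) := by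
        simp [pvCountIf, hm]; omega
      rw [hc, ih (m + 1) acc]
      simp [pvAltStep, hm, pvBuild, pvLevels]
    | false =>
      have hc : pvCountIf (line :: rest) + m = pvCountIf rest + m := by
        simp [pvCountIf, hm]
      rw [hc, ih m acc]
      simp [pvAltStep, hm, pvBuild, pvLevels]

-- ===== VERDICT =====
theorem gen_lines_with_ident_spec : Claim_equal_gen_lines_with_ident := by
  intro base_ident_line lines _
  unfold Spec_gen_lines_with_ident gen_lines_with_ident gen_lines_with_ident_alt
  have hb : (pvGetIncreasedIdent base_ident_line.toList).all PySem.Chars.isspace = true := by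
    unfold pvGetIncreasedIdent pvIncreaseIdent
    simp only [List.all_append, pvGetIdent_isspace, Bool.true_and]
    decide
  have h0 : pvGetIncreasedIdent base_ident_line.toList
      = pvGetIncreasedIdent base_ident_line.toList ++ PySem.List.pyRepeat pvSINGLE_IDENT ((0 : Nat) : Int) := by
    simp [PySem.List.pyRepeat]
  rw [h0, pvFoldA _ hb lines 0 []]
  show [] ++ pvBuild (pvGetIncreasedIdent base_ident_line.toList) lines 0
      = ((lines.reverse.foldl (pvAltStep (pvGetIncreasedIdent base_ident_line.toList))
          (pvCountIf lines, [])).2).reverse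
  have hB := pvFoldB (pvGetIncreasedIdent base_ident_line.toList) lines 0 []
  simp only [Nat.add_zero] at hB
  rw [hB]
  simp
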